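-- pv_equiv track=rewrite | github.com/vandanamsgithub/Excel_Analysis-Automation | Process_2.py | process_dict
-- ===== SOURCE A (Python) =====
-- def process_dict(d):
--     # Create a reverse mapping of values to keys
--     reverse_mapping = {}
--     for key, value in d.items():
--         value = value.strip()
--         if value not in reverse_mapping:
--             reverse_mapping[value] = []
--         reverse_mapping[value].append(key)
--
--     # Identify keys that should be changed to "NA"
--     keys_to_change = []
--     for value, keys in reverse_mapping.items():
--         if len(keys) > 1 and value != "NA":
--             keys_to_change.extend(keys[1:])
--
--     # Update the original dictionary
--     for key in keys_to_change:
--         d[key] = "NA"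
--
--     return d
-- ===== SOURCE B (Python) =====
-- def process_dict(d):
--     # One streaming pass: first occurrence of each stripped value is kept,
--     # later occurrences (unless the stripped value is "NA") are set to "NA".
--     seen = set()
--     for key, value in list(d.items()):
--         v = value.strip()
--         if v in seen and v != "NA":
--             d[key] = "NA"
--         else:
--             seen.add(v)
--     return d
-- ===== Notes on version B (the rewrite author's own statement) =====
-- stated objective: simpler
-- what changed: Replaces A's three passes (build a full reverse value->keys index, collect the tails of every duplicate group, then write NA back by key) with one streaming pass over the items that keeps a set of stripped values already seen and overwrites an entry the moment its stripped value is a repeat (and not 'NA').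
import Mathlib
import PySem

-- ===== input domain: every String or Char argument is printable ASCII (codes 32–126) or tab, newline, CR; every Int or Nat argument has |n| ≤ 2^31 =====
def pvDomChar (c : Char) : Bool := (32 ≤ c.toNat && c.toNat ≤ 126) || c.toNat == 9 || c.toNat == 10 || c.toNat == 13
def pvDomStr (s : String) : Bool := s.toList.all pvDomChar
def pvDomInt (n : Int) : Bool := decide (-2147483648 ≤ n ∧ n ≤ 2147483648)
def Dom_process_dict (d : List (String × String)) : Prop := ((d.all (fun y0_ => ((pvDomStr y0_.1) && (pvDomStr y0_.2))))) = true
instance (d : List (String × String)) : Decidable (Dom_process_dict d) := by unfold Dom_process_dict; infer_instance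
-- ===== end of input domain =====

-- B replaces A's three passes (reverse index, collect duplicate-group tails, write back)
-- with one streaming pass over the items keeping a set of stripped values seen so far.
-- Both Pythons mutate d in place and return it; the equivalence proved is about the returned value.

-- ===== PORT A =====
def process_dict (d : List (String × String)) : List (String × String) :=
  -- reverse_mapping: stripped value -> list of keys, in insertion order
  let rm : PySem.Dict String (List String) :=
    d.foldl (fun rm p =>
      let value := PySem.Str.strip p.2
      let rm := if rm.contains value then rm else rm.insert value []
      rm.modify value [] (fun ks => ks ++ [p.1])) PySem.Dict.empty
  let keys_to_change : List String :=
    rm.items.foldl (fun acc p =>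
      if 1 < p.2.length ∧ p.1 ≠ "NA" then acc ++ p.2.tail else acc) []
  (keys_to_change.foldl (fun dd k => dd.insert k "NA") (PySem.Dict.mk d)).items

-- ===== PORT B =====
def altGo : List (String × String) → PySem.Set String → List (String × String)
  | [], _ => []
  | (key, value) :: rest, seen =>
    let v := PySem.Str.strip value
    if v ∈ seen ∧ v ≠ "NA" then (key, "NA") :: altGo rest seen
    else (key, value) :: altGo rest (PySem.Set.add seen v)

def process_dict_alt (d : List (String × String)) : List (String × String) :=
  altGo d PySem.Set.empty

-- ===== PRECONDITION & SPEC =====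
-- Pre_ excludes association lists with duplicate keys: they do not represent a Python dict
-- (dict construction collapses duplicates), so list-level behaviour there is accidental.
def Pre_process_dict (d : List (String × String)) : Prop := (d.map Prod.fst).Nodup
instance (d : List (String × String)) : Decidable (Pre_process_dict d) := by unfold Pre_process_dict; infer_instance
def pvWitness_process_dict : (List (String × String)) := [("a", "x"), ("b", "x "), ("c", "NA")]
def Spec_process_dict (d : List (String × String)) (out : List (String × String)) : Prop := out = process_dict_alt d
instance (d : List (String × String)) (out : List (String × String)) : Decidable (Spec_process_dict d out) := by unfold Spec_process_dict; infer_instance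

-- ===== CLAIM (what is proved, stated in full; the proofs are below) =====
def Claim_equal_process_dict : Prop := ∀ (d : List (String × String)), Dom_process_dict d → Pre_process_dict d → Spec_process_dict d (process_dict d)

-- ===== LEMMAS AND PROOFS =====

-- the common normal form: entry (k, v) becomes "NA" iff its stripped value is not "NA"
-- and the first entry of d with that stripped value has a different key
def pvG (d : List (String × String)) (p : String × String) : String × String :=
  if PySem.Str.strip p.2 ≠ "NA" ∧
      (d.find? (fun q => PySem.Str.strip q.2 == PySem.Str.strip p.2)).map Prod.fst ≠ some p.1
  then (p.1, "NA") else p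

-- keys nodup makes entries with equal keys equal
theorem pv_key_inj {d : List (String × String)} (h : (d.map Prod.fst).Nodup)
    {p q : String × String} (hp : p ∈ d) (hq : q ∈ d) (hk : p.1 = q.1) : p = q :=
  List.inj_on_of_nodup_map h hp hq hk

-- the find? over the whole list hits an entry of the prefix iff the prefix contains the stripped value
theorem pv_find_char (d pre rest : List (String × String)) (h : (d.map Prod.fst).Nodup)
    (k v : String) (hd : d = pre ++ (k, v) :: rest) :
    ((∃ q ∈ pre, PySem.Str.strip q.2 = PySem.Str.strip v) ↔
      (d.find? (fun q => PySem.Str.strip q.2 == PySem.Str.strip v)).map Prod.fst ≠ some k) := by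
  rw [hd, List.find?_append]
  constructor
  · rintro ⟨q, hq, hqs⟩
    have hsome : (pre.find? (fun q => PySem.Str.strip q.2 == PySem.Str.strip v)).isSome := by
      rw [List.find?_isSome]
      exact ⟨q, hq, by simp [hqs]⟩
    obtain ⟨q0, hq0⟩ := Option.isSome_iff_exists.mp hsome
    have hq0mem := List.mem_of_find?_eq_some hq0
    rw [hq0]
    simp only [Option.some_or, Option.map_some, ne_eq, Option.some.injEq]
    intro heq
    have hnd := h
    rw [hd, List.map_append] at hnd
    have hdisj := List.disjoint_of_nodup_append hnd
    have hk1 : k ∈ List.map Prod.fst pre := heq ▸ List.mem_map_of_mem (f := Prod.fst) hq0mem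
    exact hdisj hk1 (by simp : k ∈ List.map Prod.fst ((k, v) :: rest))
  · intro hne
    by_contra hnex
    have hnone : pre.find? (fun q => PySem.Str.strip q.2 == PySem.Str.strip v) = none := by
      rw [List.find?_eq_none]
      intro q hq
      simp only [beq_iff_eq]
      exact fun hs => hnex ⟨q, hq, hs⟩
    rw [hnone, Option.none_or, List.find?_cons_of_pos (by simp)] at hne
    exact hne rfl

theorem pv_altGo_eq (d : List (String × String)) (h : (d.map Prod.fst).Nodup) :
    ∀ rest pre seen, d = pre ++ rest →
      (∀ s : String, s ∈ seen ↔ ∃ q ∈ pre, PySem.Str.strip q.2 = s) →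
      altGo rest seen = rest.map (pvG d) := by
  intro rest
  induction rest with
  | nil => intro _ _ _ _; rfl
  | cons p rest ih =>
    intro pre seen hd hinv
    obtain ⟨k, v⟩ := p
    have hfind := pv_find_char d pre rest h k v hd
    have hcond : (PySem.Str.strip v ∈ seen ∧ PySem.Str.strip v ≠ "NA") ↔
        (PySem.Str.strip v ≠ "NA" ∧
          (d.find? (fun q => PySem.Str.strip q.2 == PySem.Str.strip v)).map Prod.fst ≠ some k) := by
      rw [hinv]
      exact ⟨fun ⟨a, b⟩ => ⟨b, hfind.mp a⟩, fun ⟨a, b⟩ => ⟨hfind.mpr b, a⟩⟩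
    have hd' : d = (pre ++ [(k, v)]) ++ rest := by simp [hd]
    by_cases hc : PySem.Str.strip v ∈ seen ∧ PySem.Str.strip v ≠ "NA"
    · rw [altGo, if_pos hc, List.map_cons]
      have hG : pvG d (k, v) = (k, "NA") := by rw [pvG, if_pos (hcond.mp hc)]
      rw [hG, ih (pre ++ [(k, v)]) seen hd' ?_]
      intro s
      rw [hinv]
      constructor
      · rintro ⟨q, hq, hs⟩; exact ⟨q, by simp [hq], hs⟩
      · rintro ⟨q, hq, hs⟩
        rcases (List.mem_append.mp hq) with hq | hq
        · exact ⟨q, hq, hs⟩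
        · simp only [List.mem_singleton] at hq
          subst hq
          obtain ⟨q0, hq0, hq0s⟩ := (hinv (PySem.Str.strip v)).mp hc.1
          exact ⟨q0, hq0, hs ▸ hq0s⟩
    · rw [altGo, if_neg hc, List.map_cons]
      have hG : pvG d (k, v) = (k, v) := by rw [pvG, if_neg (fun hx => hc (hcond.mpr hx))]
      rw [hG, ih (pre ++ [(k, v)]) _ hd' ?_]
      intro s
      rw [PySem.Set.mem_add, hinv]
      constructor
      · rintro (⟨q, hq, hs⟩ | hs)
        · exact ⟨q, by simp [hq], hs⟩
        · exact ⟨(k, v), by simp, hs.symm⟩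
      · rintro ⟨q, hq, hs⟩
        rcases (List.mem_append.mp hq) with hq | hq
        · exact Or.inl ⟨q, hq, hs⟩
        · simp only [List.mem_singleton] at hq
          subst hq; exact Or.inr hs.symm

-- A's reverse mapping, with the two-step (conditional insert; append) fused into one modify
def pvRM (d : List (String × String)) : PySem.Dict String (List String) :=
  d.foldl (fun rm p => rm.modify (PySem.Str.strip p.2) [] (fun ks => ks ++ [p.1])) PySem.Dict.empty

-- the keys of d whose value strips to s, in order
def pvGroup (d : List (String × String)) (s : String) : List String :=
  (d.filter (fun p => PySem.Str.strip p.2 == s)).map Prod.fst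

def pvKTC (d : List (String × String)) : List String :=
  (pvRM d).items.foldl (fun acc p =>
    if 1 < p.2.length ∧ p.1 ≠ "NA" then acc ++ p.2.tail else acc) []

theorem pv_A_unfold (d : List (String × String)) :
    process_dict d =
      ((pvKTC d).foldl (fun dd k => dd.insert k "NA") (PySem.Dict.mk d)).items := by
  unfold process_dict pvKTC pvRM
  rw [PySem.List.foldl_congr_mem (g := fun rm p =>
    rm.modify (PySem.Str.strip p.2) [] (fun ks => ks ++ [p.1]))]
  intro rm p _
  by_cases hc : rm.contains (PySem.Str.strip p.2)
  · simp [hc]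
  · simp only [hc, if_false, Bool.false_eq_true]
    simp [PySem.Dict.modify, PySem.Dict.insert_insert_self, PySem.Dict.getD_insert_self,
      PySem.Dict.getD_of_not_contains _ _ (Bool.eq_false_iff.mpr hc)]

theorem pv_rm_getD (d : List (String × String)) (s : String) :
    (pvRM d).getD s [] = pvGroup d s := by
  unfold pvRM pvGroup
  have hfm : (d.foldl (fun rm p => rm.modify (PySem.Str.strip p.2) [] (fun ks => ks ++ [p.1]))
        PySem.Dict.empty)
      = ((d.map (fun p => (PySem.Str.strip p.2, p.1))).foldl
          (fun dd q => dd.modify q.1 [] (fun ks => ks ++ [q.2])) PySem.Dict.empty) :=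
    (List.foldl_map (f := fun p : String × String => (PySem.Str.strip p.2, p.1))
      (g := fun (dd : PySem.Dict String (List String)) (q : String × String) =>
        dd.modify q.1 [] (fun ks => ks ++ [q.2]))).symm
  rw [hfm]
  rw [PySem.Dict.getD_foldl_modify_append]
  simp [List.filter_map, List.map_map, Function.comp_def]

theorem pv_rm_keys (d : List (String × String)) :
    (pvRM d).keys = PySem.Set.ofList (d.map (fun p => PySem.Str.strip p.2)) := by
  unfold pvRM
  rw [PySem.Dict.keys_foldl_modify_key d (fun p => PySem.Str.strip p.2) []
    (fun _ p => fun ks => ks ++ [p.1])]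
  simp [PySem.Set.update_nil_left]

theorem pv_rm_nodup (d : List (String × String)) : (pvRM d).keys.Nodup := by
  unfold pvRM
  exact PySem.Dict.nodup_keys_foldl_modify_key d (fun p => PySem.Str.strip p.2) []
    (fun _ p => fun ks => ks ++ [p.1]) PySem.Dict.empty (by simp)

theorem pv_ktc_mem (d : List (String × String)) (x : String) :
    x ∈ pvKTC d ↔ ∃ s ∈ (pvRM d).keys,
      1 < (pvGroup d s).length ∧ s ≠ "NA" ∧ x ∈ (pvGroup d s).tail := by
  unfold pvKTC
  rw [PySem.List.foldl_ite_eq_foldl_filter, PySem.List.foldl_append_eq_flatMap,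
    PySem.Dict.items_eq_map_keys (pvRM d) (pv_rm_nodup d) []]
  simp only [List.nil_append, List.mem_flatMap, List.mem_filter, List.mem_map]
  constructor
  · rintro ⟨p, ⟨⟨s, hs, rfl⟩, hcond⟩, hx⟩
    simp only [decide_eq_true_eq, pv_rm_getD] at hcond hx
    exact ⟨s, hs, hcond.1, hcond.2, hx⟩
  · rintro ⟨s, hs, h1, h2, hx⟩
    exact ⟨(s, (pvRM d).getD s []), ⟨⟨s, hs, rfl⟩, by simp [pv_rm_getD, h1, h2]⟩,
      by simpa [pv_rm_getD] using hx⟩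

theorem pv_upd (ks : List String) : ∀ (dd : PySem.Dict String String),
    (∀ k ∈ ks, dd.contains k = true) →
    (ks.foldl (fun dd k => dd.insert k "NA") dd).items
      = dd.items.map (fun p => if p.1 ∈ ks then (p.1, "NA") else p) := by
  induction ks with
  | nil => intro dd _; simp
  | cons k ks ih =>
    intro dd hc
    rw [List.foldl_cons, ih _ (fun k' hk' => by
      rw [PySem.Dict.contains_insert, hc k' (List.mem_cons_of_mem _ hk')]; simp)]
    rw [PySem.Dict.items_insert_of_contains dd "NA" (hc k (by simp))]
    rw [List.map_map]
    apply List.map_congr_left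
    intro p _
    by_cases h1 : p.1 = k <;> by_cases h2 : p.1 ∈ ks <;>
      simp [h1, h2]

theorem pv_A_eq (d : List (String × String)) (h : (d.map Prod.fst).Nodup) :
    process_dict d = d.map (pvG d) := by
  have hcont : ∀ k ∈ pvKTC d, (PySem.Dict.mk d).contains k = true := by
    intro k hk
    obtain ⟨s, _, _, _, htail⟩ := (pv_ktc_mem d k).mp hk
    have hkg : k ∈ pvGroup d s := List.mem_of_mem_tail htail
    obtain ⟨q, hq, rfl⟩ := List.mem_map.mp hkg
    have hqd : q ∈ d := (List.mem_filter.mp hq).1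
    simp [PySem.Dict.contains_eq_decide_mem_keys, PySem.Dict.keys]
    exact ⟨q.2, by simpa using hqd⟩
  rw [pv_A_unfold, pv_upd _ _ hcont]
  have hitems : (PySem.Dict.mk d).items = d := rfl
  rw [hitems]
  apply List.map_congr_left
  intro p hp
  obtain ⟨k, v⟩ := p
  have hkin : k ∈ pvGroup d (PySem.Str.strip v) :=
    List.mem_map_of_mem (List.mem_filter.mpr ⟨hp, by simp⟩)
  have hgnd : (pvGroup d (PySem.Str.strip v)).Nodup :=
    h.sublist ((List.filter_sublist).map Prod.fst)
  have hhead : (pvGroup d (PySem.Str.strip v)).head?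
      = (d.find? (fun q => PySem.Str.strip q.2 == PySem.Str.strip v)).map Prod.fst := by
    unfold pvGroup; rw [List.head?_map, List.head?_filter]
  have hiff : k ∈ pvKTC d ↔ (PySem.Str.strip v ≠ "NA" ∧
      (d.find? (fun q => PySem.Str.strip q.2 == PySem.Str.strip v)).map Prod.fst ≠ some k) := by
    rw [pv_ktc_mem]
    constructor
    · rintro ⟨s, _, _, hne, htail⟩
      have hkg : k ∈ pvGroup d s := List.mem_of_mem_tail htail
      obtain ⟨q, hq, hq1⟩ := List.mem_map.mp hkg
      obtain ⟨hqd, hqs⟩ := List.mem_filter.mp hq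
      have hqe : q = (k, v) := pv_key_inj h hqd hp hq1
      have hse : s = PySem.Str.strip v := by
        subst hqe; exact (beq_iff_eq.mp hqs).symm
      subst hse
      refine ⟨hne, ?_⟩
      cases hg : pvGroup d (PySem.Str.strip v) with
      | nil => rw [hg] at htail; simp at htail
      | cons k0 t =>
        rw [hg] at htail hgnd
        simp only [List.tail_cons] at htail
        have hk0 : k0 ≠ k := fun he => (List.nodup_cons.mp hgnd).1 (he ▸ htail)
        rw [← hhead, hg]
        simpa using hk0
    · rintro ⟨hne, hfind⟩
      cases hg : pvGroup d (PySem.Str.strip v) with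
      | nil => rw [hg] at hkin; simp at hkin
      | cons k0 t =>
        have hk0 : k0 ≠ k := by
          rw [← hhead, hg] at hfind; simpa using hfind
        have hkt : k ∈ t := by
          rw [hg] at hkin
          rcases List.mem_cons.mp hkin with he | ht
          · exact absurd he.symm hk0
          · exact ht
        refine ⟨PySem.Str.strip v, ?_, ?_, hne, ?_⟩
        · rw [pv_rm_keys, PySem.Set.mem_ofList]
          exact List.mem_map.mpr ⟨(k, v), hp, rfl⟩
        · rw [hg]; simp only [List.length_cons]
          have : 0 < t.length := List.length_pos_of_mem hkt
          omega
        · rw [hg]; simpa using hkt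
  rw [pvG]
  by_cases hx : k ∈ pvKTC d
  · rw [if_pos hx, if_pos (hiff.mp hx)]
  · rw [if_neg hx, if_neg (fun hc => hx (hiff.mpr hc))]

-- ===== VERDICT (by name: the statement is the Claim_ definition above) =====
theorem process_dict_spec : Claim_equal_process_dict := by
  intro d _ hpre
  unfold Spec_process_dict process_dict_alt
  rw [pv_A_eq d hpre, pv_altGo_eq d hpre d [] PySem.Set.empty rfl (by simp [PySem.Set.empty])]
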